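-- pv_equiv track=rewrite | github.com/NehaHeralgi/infyTQ-Python-part2-Assignment7 | nearest_palindrom.py | nearest_palindrome
-- ===== SOURCE A (Python) =====
-- def is_palindrome(num):
--     #start writitng your code here
--     string=str(num)
--     l1=[]
--     l2=[]
--     for i in string:
--         l1.append(int(i))
--         l2.append(int(i))
--     l2.reverse()
--     if l1==l2:
--         return True
--     else:
--         False
--
-- def nearest_palindrome(number):
--     n=number
--     i=n+1
--     while(True):
--         if is_palindrome(i)==True:
--             return i
--         else:
--             i=i+1
-- ===== SOURCE B (Python) =====
-- def nearest_palindrome(number):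
--     # Construct the next palindrome arithmetically from the left half of
--     # m = number + 1 (mirror the left half; if the mirror falls below m,
--     # increment the left half and mirror again) instead of testing every
--     # integer upward. O(d) in the digit count d.
--     m = number + 1
--     L = 0
--     while 10 ** L <= m:
--         L += 1
--     k = L // 2
--
--     def mirror(x):
--         r = 0
--         y = x // 10 ** (L % 2)
--         for _ in range(k):
--             r = r * 10 + y % 10
--             y //= 10
--         return x * 10 ** k + r
--
--     c = mirror(m // 10 ** k)
--     return c if c >= m else mirror(m // 10 ** k + 1)
-- ===== Notes on version B (the rewrite author's own statement) =====
-- stated objective: faster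
-- what changed: replaces A's linear upward scan that string-tests every integer for palindromicity with a direct arithmetic construction: mirror the left half of number+1 onto its right half, incrementing the left half once when the mirrored candidate falls below number+1
import Mathlib
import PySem

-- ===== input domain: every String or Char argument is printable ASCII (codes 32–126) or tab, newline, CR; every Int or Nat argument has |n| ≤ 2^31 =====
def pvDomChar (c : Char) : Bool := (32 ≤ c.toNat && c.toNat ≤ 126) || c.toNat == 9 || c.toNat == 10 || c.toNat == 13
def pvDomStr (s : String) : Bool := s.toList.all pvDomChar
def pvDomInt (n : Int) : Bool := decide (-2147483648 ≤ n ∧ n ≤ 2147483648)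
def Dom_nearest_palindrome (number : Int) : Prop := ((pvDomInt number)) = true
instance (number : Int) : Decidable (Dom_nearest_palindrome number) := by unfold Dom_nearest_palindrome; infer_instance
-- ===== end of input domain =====

-- B replaces A's linear upward palindrome scan by O(d) mirror-construction of the
-- next palindrome from the left half of number+1 (objective: faster).


-- ===== PORT A =====
-- is_palindrome(num): l1 = [int(c) for c in str(num)] (int(c) can raise → Option),
-- l2 = reversed copy; returns True iff l1 == l2 (otherwise falls through to None,
-- which the caller's '== True' treats exactly like False, hence one Bool here).
def pvIsPalindromeA (num : Int) : Option Bool :=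
  let s := PySem.Int.toChars num
  match s.mapM (fun c => PySem.Int.ofChars? [c]) with
  | none => none
  | some l1 => some (decide (l1 = l1.reverse))

-- the 'while True' loop of A, with fuel ('none' = A raises or runs beyond the fuel;
-- the fuel is proved sufficient on Dom ∧ Pre_ below)
def pvLoopA : Nat → Int → Option Int
  | 0, _ => none
  | fuel + 1, i =>
    match pvIsPalindromeA i with
    | none => none
    | some b => if b then some i else pvLoopA fuel (i + 1)

def nearest_palindrome (number : Int) : Int :=
  (pvLoopA 2000000 (number + 1)).getD 0

-- ===== PORT B =====
-- L = 0; while 10**L <= m: L += 1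
def pvDigLenB (m : Int) (L : Nat) : Nat :=
  if (10 : Int) ^ L ≤ m then pvDigLenB m (L + 1) else L
termination_by (m + 1 - 10 ^ L).toNat
decreasing_by
  have h1 : (10 : Int) ^ L > 0 := by positivity
  omega

-- r = 0; y = x // 10**(L%2); for _ in range(k): r = r*10 + y%10; y //= 10
def pvRevB : Nat → Int → Int → Int
  | 0, _, r => r
  | k + 1, y, r => pvRevB k (PySem.Int.floordiv y 10) (r * 10 + PySem.Int.mod y 10)

def pvMirrorB (x : Int) (L k : Nat) : Int :=
  x * 10 ^ k + pvRevB k (PySem.Int.floordiv x (10 ^ (L % 2))) 0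

def nearest_palindrome_alt (number : Int) : Int :=
  let m := number + 1
  let L := pvDigLenB m 0
  let k := L / 2
  let c := pvMirrorB (PySem.Int.floordiv m (10 ^ k)) L k
  if m ≤ c then c else pvMirrorB (PySem.Int.floordiv m (10 ^ k) + 1) L k

-- ===== PRECONDITION & SPEC =====
-- A raises ValueError for number < -1: the search starts at a negative i and
-- is_palindrome calls int('-') on the sign character. Pre_ excludes exactly those.
def Pre_nearest_palindrome (number : Int) : Prop := -1 ≤ number
instance (number : Int) : Decidable (Pre_nearest_palindrome number) := by unfold Pre_nearest_palindrome; infer_instance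
def pvWitness_nearest_palindrome : Int := 1992

def Spec_nearest_palindrome (number : Int) (out : Int) : Prop := out = nearest_palindrome_alt number
instance (number : Int) (out : Int) : Decidable (Spec_nearest_palindrome number out) := by unfold Spec_nearest_palindrome; infer_instance

-- ===== CLAIM (what is proved, stated in full; the proofs are below) =====
def Claim_equal_nearest_palindrome : Prop := ∀ (number : Int), Dom_nearest_palindrome number → Pre_nearest_palindrome number → Spec_nearest_palindrome number (nearest_palindrome number)

-- ===== LEMMAS AND PROOFS =====

lemma digitsAppend_succ (k x : Nat) :
    Nat.digitsAppend 10 (k + 1) x = x % 10 :: Nat.digitsAppend 10 k (x / 10) := by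
  unfold Nat.digitsAppend
  rcases Nat.eq_zero_or_pos x with hx | hx
  · subst hx; simp [List.replicate_succ]
  · rw [Nat.digits_def' (by norm_num) hx]
    simp [Nat.succ_sub_succ]

def natRev : Nat → Nat → Nat → Nat
  | 0, _, r => r
  | k + 1, y, r => natRev k (y / 10) (r * 10 + y % 10)

lemma ofDigits_digitsAppend (k x : Nat) :
    Nat.ofDigits 10 (Nat.digitsAppend 10 k x) = x := by
  rw [Nat.digitsAppend, Nat.ofDigits_append_replicate_zero, Nat.ofDigits_digits]

lemma digitsAppend_length (k x : Nat) (h : x < 10 ^ k) : (Nat.digitsAppend 10 k x).length = k :=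
  Nat.length_digitsAppend (by norm_num) k h

lemma natRev_eq (k : Nat) : ∀ x r, x < 10 ^ k →
    natRev k x r = Nat.ofDigits 10 (Nat.digitsAppend 10 k x).reverse + r * 10 ^ k := by
  induction k with
  | zero =>
    intro x r hx
    interval_cases x
    simp [natRev, Nat.digitsAppend]
  | succ k ih =>
    intro x r hx
    have hdiv : x / 10 < 10 ^ k := by
      rw [Nat.div_lt_iff_lt_mul (by norm_num)]
      calc x < 10 ^ (k + 1) := hx
      _ = 10 ^ k * 10 := by ring
    rw [natRev, ih _ _ hdiv, digitsAppend_succ, List.reverse_cons, Nat.ofDigits_append,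
      List.length_reverse, digitsAppend_length k _ hdiv, Nat.ofDigits_singleton]
    ring

lemma natRev_lt (k x : Nat) (hx : x < 10 ^ k) : natRev k x 0 < 10 ^ k := by
  rw [natRev_eq k x 0 hx]
  simp only [Nat.zero_mul, Nat.add_zero]
  have h1 : ∀ d ∈ (Nat.digitsAppend 10 k x).reverse, d < 10 := by
    intro d hd
    exact Nat.lt_of_mem_digitsAppend (by norm_num) k d (List.mem_reverse.mp hd)
  have := Nat.ofDigits_lt_base_pow_length (by norm_num) h1
  rwa [List.length_reverse, digitsAppend_length k _ hx] at this

lemma digits_div_o (n o : Nat) (ho : o ≤ 1) :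
    Nat.digits 10 (n / 10 ^ o) = List.drop o (Nat.digits 10 n) := by
  interval_cases o
  · simp
  · rcases Nat.eq_zero_or_pos n with hn | hn
    · simp [hn]
    · rw [Nat.digits_def' (b := 10) (by norm_num) hn]
      simp

lemma len_eq_of_bounds (v L : Nat) (h1 : 10 ^ (L - 1) ≤ v) (h2 : v < 10 ^ L) (hL : 1 ≤ L) :
    (Nat.digits 10 v).length = L := by
  have a := (Nat.digits_length_le_iff (b := 10) (by norm_num) v).mpr h2
  have b := (Nat.lt_digits_length_iff (b := 10) (by norm_num) v).mpr h1
  omega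

lemma digitsAppend_eq_self (x k : Nat) (h : (Nat.digits 10 x).length = k) :
    Nat.digitsAppend 10 k x = Nat.digits 10 x := by
  rw [Nat.digitsAppend, ← h]
  simp

lemma natRev_halves (v L k : Nat) (hlen : (Nat.digits 10 v).length = k + (L % 2)) :
    natRev k (v / 10 ^ (L % 2)) 0 =
      Nat.ofDigits 10 (List.drop (L % 2) (Nat.digits 10 v)).reverse := by
  have ho : L % 2 ≤ 1 := by omega
  have hd : Nat.digits 10 (v / 10 ^ (L % 2)) = List.drop (L % 2) (Nat.digits 10 v) :=
    digits_div_o v _ ho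
  have hlen' : (Nat.digits 10 (v / 10 ^ (L % 2))).length = k := by
    rw [hd, List.length_drop, hlen]; omega
  have hlt : v / 10 ^ (L % 2) < 10 ^ k :=
    (Nat.digits_length_le_iff (by norm_num) _).mp (le_of_eq hlen')
  rw [natRev_eq k _ 0 hlt, digitsAppend_eq_self _ _ hlen', hd]
  ring

def natMirror (x L k : Nat) : Nat := x * 10 ^ k + natRev k (x / 10 ^ (L % 2)) 0

abbrev palN (n : Nat) : Prop := Nat.digits 10 n = (Nat.digits 10 n).reverse

lemma digitsAppend_ofDigits (l : List Nat) (h : ∀ d ∈ l, d < 10) :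
    Nat.digitsAppend 10 l.length (Nat.ofDigits 10 l) = l :=
  (Nat.setInvOn_digitsAppend_ofDigits (by norm_num) l.length).1 ⟨rfl, h⟩

lemma mirror_digits (left L : Nat) (hL : 1 ≤ L)
    (h1 : 10 ^ (L - L / 2 - 1) ≤ left) (h2 : left < 10 ^ (L - L / 2)) :
    Nat.digits 10 (natMirror left L (L / 2)) =
      (List.drop (L % 2) (Nat.digits 10 left)).reverse ++ Nat.digits 10 left := by
  set k := L / 2 with hk
  set o := L % 2 with ho
  have hlen : (Nat.digits 10 left).length = L - k := len_eq_of_bounds left (L - k) h1 h2 (by omega)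
  have hrev := natRev_halves left L k (by omega)
  set R := (List.drop o (Nat.digits 10 left)).reverse with hR
  have hdroplen : R.length = k := by
    rw [hR]; simp [List.length_drop, hlen]; omega
  have hdropmem : ∀ d ∈ R, d < 10 := by
    intro d hd
    exact Nat.digits_lt_base (by norm_num) (List.mem_of_mem_drop (List.mem_reverse.mp hd))
  have hlolt : Nat.ofDigits 10 R < 10 ^ k := by
    have := Nat.ofDigits_lt_base_pow_length (b := 10) (by norm_num) hdropmem
    rwa [hdroplen] at this
  have hlolen : (Nat.digits 10 (Nat.ofDigits 10 R)).length ≤ k :=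
    (Nat.digits_length_le_iff (by norm_num) _).mpr hlolt
  have hpos : 0 < left := lt_of_lt_of_le (pow_pos (by norm_num) _) h1
  have hdecomp := Nat.digits_append_zeroes_append_digits (b := 10) (n := Nat.ofDigits 10 R)
      (k := k - (Nat.digits 10 (Nat.ofDigits 10 R)).length) (m := left) (by norm_num) hpos
  rw [Nat.add_sub_cancel' hlolen] at hdecomp
  have hda2 : Nat.digitsAppend 10 k (Nat.ofDigits 10 R) = R := by
    rw [← hdroplen]
    exact digitsAppend_ofDigits _ hdropmem
  have hm : natMirror left L k = Nat.ofDigits 10 R + 10 ^ k * left := by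
    rw [natMirror, hrev]; ring
  rw [hm, ← hdecomp, List.append_assoc]
  rw [show Nat.digits 10 (Nat.ofDigits 10 R) ++
      (List.replicate (k - (Nat.digits 10 (Nat.ofDigits 10 R)).length) 0 ++ Nat.digits 10 left)
      = Nat.digitsAppend 10 k (Nat.ofDigits 10 R) ++ Nat.digits 10 left by
    rw [Nat.digitsAppend, List.append_assoc], hda2]

lemma reverse_short {α : Type} (l : List α) (h : l.length ≤ 1) : l.reverse = l := by
  match l with
  | [] => rfl
  | [a] => rfl
  | a :: b :: t => simp at h

lemma mirror_pal (left L : Nat) (hL : 1 ≤ L)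
    (h1 : 10 ^ (L - L / 2 - 1) ≤ left) (h2 : left < 10 ^ (L - L / 2)) :
    palN (natMirror left L (L / 2)) := by
  unfold palN
  rw [mirror_digits left L hL h1 h2]
  set o := L % 2 with ho
  set dl := Nat.digits 10 left with hdl
  have htake : (List.take o dl).reverse = List.take o dl :=
    reverse_short _ (le_trans (List.length_take_le _ _) (by omega))
  calc (List.drop o dl).reverse ++ dl
      = (List.drop o dl).reverse ++ (List.take o dl ++ List.drop o dl) := by rw [List.take_append_drop]
    _ = ((List.drop o dl).reverse ++ List.take o dl) ++ List.drop o dl := by rw [List.append_assoc]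
    _ = ((List.drop o dl).reverse ++ (List.take o dl).reverse) ++ List.drop o dl := by rw [htake]
    _ = (List.take o dl ++ List.drop o dl).reverse ++ List.drop o dl := by rw [List.reverse_append]
    _ = dl.reverse ++ List.drop o dl := by rw [List.take_append_drop]
    _ = ((List.drop o dl).reverse ++ dl).reverse := by rw [List.reverse_append, List.reverse_reverse]

lemma pal_eq_mirror (j L : Nat) (hL : 1 ≤ L) (hj1 : 10 ^ (L - 1) ≤ j) (hj2 : j < 10 ^ L)
    (hp : palN j) : j = natMirror (j / 10 ^ (L / 2)) L (L / 2) := by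
  set k := L / 2 with hk
  set o := L % 2 with ho
  set lj := j / 10 ^ k with hlj
  set lo := j % 10 ^ k with hlo2
  have hko : k ≤ L - 1 := by omega
  have hlolt : lo < 10 ^ k := Nat.mod_lt _ (pow_pos (by norm_num) _)
  have hljlb : 10 ^ (L - k - 1) ≤ lj := by
    rw [hlj, Nat.le_div_iff_mul_le (pow_pos (by norm_num) _), ← pow_add]
    calc 10 ^ (L - k - 1 + k) = 10 ^ (L - 1) := by congr 1; omega
      _ ≤ j := hj1
  have hljub : lj < 10 ^ (L - k) := by
    rw [hlj, Nat.div_lt_iff_lt_mul (pow_pos (by norm_num) _), ← pow_add]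
    calc j < 10 ^ L := hj2
      _ = 10 ^ (L - k + k) := by congr 1; omega
  have hpos : 0 < lj := lt_of_lt_of_le (pow_pos (by norm_num) _) hljlb
  have hlenj : (Nat.digits 10 lj).length = L - k := len_eq_of_bounds lj (L - k) hljlb hljub (by omega)
  have hlolen : (Nat.digits 10 lo).length ≤ k := (Nat.digits_length_le_iff (by norm_num) _).mpr hlolt
  have hdecomp := Nat.digits_append_zeroes_append_digits (b := 10) (n := lo)
      (k := k - (Nat.digits 10 lo).length) (m := lj) (by norm_num) hpos
  rw [Nat.add_sub_cancel' hlolen] at hdecomp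
  have hj : j = lo + 10 ^ k * lj := (Nat.mod_add_div j (10 ^ k)).symm
  have hdig : Nat.digits 10 j = Nat.digitsAppend 10 k lo ++ Nat.digits 10 lj := by
    rw [Nat.digitsAppend, hdecomp, ← hj]
  have hdalen : (Nat.digitsAppend 10 k lo).length = k := digitsAppend_length k lo hlolt
  -- take k of both sides of the palindrome equation
  have htake : Nat.digitsAppend 10 k lo = (List.drop o (Nat.digits 10 lj)).reverse := by
    have h1 : (Nat.digits 10 j).take k = Nat.digitsAppend 10 k lo := by
      rw [hdig, List.take_append_of_le_length (le_of_eq hdalen.symm),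
        List.take_of_length_le (le_of_eq hdalen)]
    have h2 : (Nat.digits 10 j).reverse.take k = (List.drop o (Nat.digits 10 lj)).reverse := by
      rw [hdig, List.reverse_append, List.take_append_of_le_length
        (by rw [List.length_reverse, hlenj]; omega), List.take_reverse, hlenj]
      congr 2
      omega
    rw [← h1, ← h2]
    exact congrArg (List.take k) hp
  have hloval : lo = natRev k (lj / 10 ^ o) 0 := by
    rw [natRev_halves lj L k (by omega), ← htake, ofDigits_digitsAppend]
  rw [natMirror, ← hloval, hj]
  ring

lemma digits_all9 (k : Nat) : Nat.digits 10 (10 ^ k - 1) = List.replicate k 9 := by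
  induction k with
  | zero => simp
  | succ k ih =>
    have hp : (1:Nat) ≤ 10 ^ k := Nat.one_le_pow _ _ (by norm_num)
    have hpos : 0 < 10 ^ (k + 1) - 1 := by
      have : (10:Nat) ^ (k + 1) = 10 ^ k * 10 := by ring
      omega
    rw [Nat.digits_def' (by norm_num) hpos]
    have h10 : (10:Nat) ^ (k + 1) = 10 ^ k * 10 := by ring
    have hmod : (10 ^ (k + 1) - 1) % 10 = 9 := by omega
    have hdiv : (10 ^ (k + 1) - 1) / 10 = 10 ^ k - 1 := by omega
    rw [hmod, hdiv, ih, List.replicate_succ]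

lemma ofDigits_replicate9 (k : Nat) : Nat.ofDigits 10 (List.replicate k 9) = 10 ^ k - 1 := by
  induction k with
  | zero => simp
  | succ k ih =>
    rw [List.replicate_succ, Nat.ofDigits_cons, ih]
    have hp : (1:Nat) ≤ 10 ^ k := Nat.one_le_pow _ _ (by norm_num)
    have h10 : (10:Nat) ^ (k + 1) = 10 ^ k * 10 := by ring
    omega

lemma mirror_all9 (L : Nat) (hL : 1 ≤ L) :
    natMirror (10 ^ (L - L / 2) - 1) L (L / 2) = 10 ^ L - 1 := by
  set k := L / 2 with hk
  have hdiv : (10 ^ (L - k) - 1) / 10 ^ (L % 2) = 10 ^ k - 1 := by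
    have h1 : (10:Nat) ^ (L - k) = 10 ^ k * 10 ^ (L % 2) := by rw [← pow_add]; congr 1; omega
    have h2 : (1:Nat) ≤ 10 ^ k := Nat.one_le_pow _ _ (by norm_num)
    rcases Nat.mod_two_eq_zero_or_one L with h | h
    · rw [h, pow_zero, mul_one] at h1
      rw [h, pow_zero, Nat.div_one, h1]
    · rw [h, pow_one] at h1 ⊢
      omega
  have hlt : 10 ^ k - 1 < 10 ^ k := by
    have : (1:Nat) ≤ 10 ^ k := Nat.one_le_pow _ _ (by norm_num)
    omega
  have hrev : natRev k (10 ^ k - 1) 0 = 10 ^ k - 1 := by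
    rw [natRev_eq k _ 0 hlt, digitsAppend_eq_self _ _ (by rw [digits_all9]; simp),
      digits_all9, List.reverse_replicate, ofDigits_replicate9]
    ring
  rw [natMirror, hdiv, hrev]
  have h1 : (10:Nat) ^ (L - k) * 10 ^ k = 10 ^ L := by rw [← pow_add]; congr 1; omega
  have h2 : (1:Nat) ≤ 10 ^ k := Nat.one_le_pow _ _ (by norm_num)
  have h3 : (1:Nat) ≤ 10 ^ (L - k) := Nat.one_le_pow _ _ (by norm_num)
  have h4 : 10 ^ k ≤ 10 ^ (L - k) * 10 ^ k := Nat.le_mul_of_pos_left _ (by positivity)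
  rw [Nat.sub_mul]
  omega

lemma mirror_lb (x L k : Nat) : x * 10 ^ k ≤ natMirror x L k := Nat.le_add_right _ _

lemma mirror_ub (x L k : Nat) (hx : x / 10 ^ (L % 2) < 10 ^ k) :
    natMirror x L k < (x + 1) * 10 ^ k := by
  have := natRev_lt k _ hx
  unfold natMirror
  nlinarith [this]

def natAlt (m : Nat) : Nat :=
  if m ≤ natMirror (m / 10 ^ ((Nat.digits 10 m).length / 2)) (Nat.digits 10 m).length ((Nat.digits 10 m).length / 2)
  then natMirror (m / 10 ^ ((Nat.digits 10 m).length / 2)) (Nat.digits 10 m).length ((Nat.digits 10 m).length / 2)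
  else natMirror (m / 10 ^ ((Nat.digits 10 m).length / 2) + 1) (Nat.digits 10 m).length ((Nat.digits 10 m).length / 2)

theorem natAlt_spec (m : Nat) :
    m ≤ natAlt m ∧ palN (natAlt m) ∧ (∀ j, m ≤ j → j < natAlt m → ¬ palN j) ∧
      natAlt m < m + 2 * 10 ^ ((Nat.digits 10 m).length / 2) := by
  rcases Nat.eq_zero_or_pos m with hm | hm
  · subst hm
    have h0 : natAlt 0 = 0 := by
      simp [natAlt, natMirror, natRev]
    rw [h0]
    refine ⟨le_refl _, by simp [palN], fun j h1 h2 => by omega, by positivity⟩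
  · set L := (Nat.digits 10 m).length with hLdef
    set k := L / 2 with hk
    set left := m / 10 ^ k with hleft
    have hL : 1 ≤ L := by
      rw [hLdef]
      exact (Nat.lt_digits_length_iff (by norm_num) m).mpr (by simpa using hm)
    have hmub : m < 10 ^ L := Nat.lt_base_pow_length_digits (by norm_num)
    have hmlb : 10 ^ (L - 1) ≤ m := (Nat.lt_digits_length_iff (by norm_num) m).mp (by omega)
    have hkL : k ≤ L - 1 := by omega
    have hleftub : left < 10 ^ (L - k) := by
      rw [hleft, Nat.div_lt_iff_lt_mul (pow_pos (by norm_num) _), ← pow_add]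
      calc m < 10 ^ L := hmub
        _ = 10 ^ (L - k + k) := by congr 1; omega
    have hleftlb : 10 ^ (L - k - 1) ≤ left := by
      rw [hleft, Nat.le_div_iff_mul_le (pow_pos (by norm_num) _), ← pow_add]
      calc 10 ^ (L - k - 1 + k) = 10 ^ (L - 1) := by congr 1; omega
        _ ≤ m := hmlb
    have hleftpos : 0 < left := lt_of_lt_of_le (pow_pos (by norm_num) _) hleftlb
    have hdivo : ∀ x : Nat, x < 10 ^ (L - k) → x / 10 ^ (L % 2) < 10 ^ k := by
      intro x hx
      rw [Nat.div_lt_iff_lt_mul (pow_pos (by norm_num) _), ← pow_add]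
      calc x < 10 ^ (L - k) := hx
        _ ≤ 10 ^ (k + L % 2) := by apply Nat.pow_le_pow_right (by norm_num); omega
    set c := natMirror left L k with hc
    have hcpal : palN c := mirror_pal left L hL hleftlb hleftub
    have hcub : c < (left + 1) * 10 ^ k := mirror_ub left L k (hdivo left hleftub)
    have hclb : left * 10 ^ k ≤ c := mirror_lb left L k
    have hmlb2 : left * 10 ^ k ≤ m := Nat.div_mul_le_self m _
    have hmub2 : m < (left + 1) * 10 ^ k := by
      have h1 : 10 ^ k * left + m % 10 ^ k = m := by
        rw [hleft]; exact Nat.div_add_mod m (10 ^ k)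
      have h2 : m % 10 ^ k < 10 ^ k := Nat.mod_lt _ (pow_pos (by norm_num) _)
      have h3 : (left + 1) * 10 ^ k = 10 ^ k * left + 10 ^ k := by ring
      rw [h3]
      omega
    -- generic: every palindrome in [10^(L-1), 10^L) is the mirror of its left half
    have hgen : ∀ j, m ≤ j → j < 10 ^ L → palN j →
        j = natMirror (j / 10 ^ k) L k ∧ left ≤ j / 10 ^ k := by
      intro j hj1 hj2 hpj
      constructor
      · exact pal_eq_mirror j L hL (le_trans hmlb hj1) hj2 hpj
      · exact Nat.div_le_div_right hj1
    by_cases hbr : m ≤ c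
    · have halt : natAlt m = c := by
        rw [natAlt, if_pos]
        exact hbr
      rw [halt]
      refine ⟨hbr, hcpal, ?_, ?_⟩
      · intro j hj1 hj2 hpj
        have hjU : j < 10 ^ L := by
          calc j < c := hj2
            _ < (left + 1) * 10 ^ k := hcub
            _ ≤ 10 ^ (L - k) * 10 ^ k := by
              apply Nat.mul_le_mul_right
              omega
            _ = 10 ^ L := by rw [← pow_add]; congr 1; omega
        obtain ⟨hje, hjge⟩ := hgen j hj1 hjU hpj
        rcases Nat.eq_or_lt_of_le hjge with heq | hlt
        · rw [hje, ← heq] at hj2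
          exact absurd hj2 (lt_irrefl _)
        · have : (left + 1) * 10 ^ k ≤ (j / 10 ^ k) * 10 ^ k :=
            Nat.mul_le_mul_right _ (by omega)
          have : c < j := by
            calc c < (left + 1) * 10 ^ k := hcub
              _ ≤ (j / 10 ^ k) * 10 ^ k := this
              _ ≤ natMirror (j / 10 ^ k) L k := mirror_lb _ _ _
              _ = j := hje.symm
          omega
      · calc c < (left + 1) * 10 ^ k := hcub
          _ = left * 10 ^ k + 10 ^ k := by ring
          _ ≤ m + 10 ^ k := by omega
          _ < m + 2 * 10 ^ k := by
            have : 0 < 10 ^ k := pow_pos (by norm_num) _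
            omega
    · rw [Nat.not_le] at hbr
      have h9 : left ≠ 10 ^ (L - k) - 1 := by
        intro h
        have hkk : c = 10 ^ L - 1 := by
          rw [hc, h, hk]
          exact mirror_all9 L hL
        have h10 : (1:Nat) ≤ 10 ^ L := Nat.one_le_pow _ _ (by norm_num)
        omega
      have hl1ub : left + 1 < 10 ^ (L - k) := by omega
      have hl1lb : 10 ^ (L - k - 1) ≤ left + 1 := by omega
      set c2 := natMirror (left + 1) L k with hc2
      have hc2pal : palN c2 := mirror_pal (left + 1) L hL hl1lb hl1ub
      have hc2lb : (left + 1) * 10 ^ k ≤ c2 := mirror_lb _ _ _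
      have hc2ub : c2 < (left + 2) * 10 ^ k := mirror_ub (left + 1) L k (hdivo _ hl1ub)
      have halt : natAlt m = c2 := by
        rw [natAlt, if_neg (not_le.mpr hbr)]
      rw [halt]
      have hmc2 : m ≤ c2 := le_trans (le_of_lt hmub2) hc2lb
      refine ⟨hmc2, hc2pal, ?_, ?_⟩
      · intro j hj1 hj2 hpj
        have hjU : j < 10 ^ L := by
          calc j < c2 := hj2
            _ < (left + 2) * 10 ^ k := hc2ub
            _ ≤ 10 ^ (L - k) * 10 ^ k := by
              apply Nat.mul_le_mul_right
              omega
            _ = 10 ^ L := by rw [← pow_add]; congr 1; omega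
        obtain ⟨hje, hjge⟩ := hgen j hj1 hjU hpj
        rcases Nat.eq_or_lt_of_le hjge with heq | hlt
        · rw [hje, ← heq, ← hc] at hj1
          omega
        · rcases Nat.eq_or_lt_of_le hlt with heq2 | hlt2
          · rw [hje, ← heq2, ← hc2] at hj2
            exact absurd hj2 (lt_irrefl _)
          · have : (left + 2) * 10 ^ k ≤ (j / 10 ^ k) * 10 ^ k :=
              Nat.mul_le_mul_right _ (by omega)
            have : c2 < j := by
              calc c2 < (left + 2) * 10 ^ k := hc2ub
                _ ≤ (j / 10 ^ k) * 10 ^ k := this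
                _ ≤ natMirror (j / 10 ^ k) L k := mirror_lb _ _ _
                _ = j := hje.symm
            omega
      · calc c2 < (left + 2) * 10 ^ k := hc2ub
          _ = left * 10 ^ k + 2 * 10 ^ k := by ring
          _ ≤ m + 2 * 10 ^ k := by omega


lemma toDigitsCore_eq (n : Nat) : ∀ fuel ds, n < fuel → 0 < n →
    Nat.toDigitsCore 10 fuel n ds = ((Nat.digits 10 n).map Nat.digitChar).reverse ++ ds := by
  induction n using Nat.strong_induction_on with
  | _ n ih =>
    intro fuel ds hfuel hn
    match fuel, hfuel with
    | f + 1, _ =>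
      rw [Nat.toDigitsCore]
      by_cases h : n / 10 = 0
      · simp only [h, if_pos]
        rw [Nat.digits_def' (b := 10) (by norm_num) hn, h]
        simp
      · rw [if_neg h]
        have hlt : n / 10 < n := Nat.div_lt_self hn (by norm_num)
        have hf : n / 10 < f := by omega
        rw [ih (n / 10) hlt f _ hf (Nat.pos_of_ne_zero h)]
        rw [Nat.digits_def' (b := 10) (by norm_num) hn]
        simp

lemma ofChars_digitChar (d : Nat) (h : d < 10) :
    PySem.Int.ofChars? [Nat.digitChar d] = some (d : Int) := by
  revert d h; decide

lemma mapM_digitChar : ∀ (l : List Nat), (∀ d ∈ l, d < 10) →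
    (l.map Nat.digitChar).mapM (fun c => PySem.Int.ofChars? [c]) =
      some (List.map (fun (d : Nat) => (d : Int)) l) := by
  intro l
  induction l with
  | nil => intro _; rfl
  | cons a t ih =>
    intro h
    rw [List.map_cons, List.mapM_cons, ofChars_digitChar a (h a (by simp)),
      ih (fun d hd => h d (by simp [hd]))]
    rfl


lemma isPalA_cast (n : Nat) : pvIsPalindromeA (n : Int) = some (decide (palN n)) := by
  unfold pvIsPalindromeA
  have hchars : PySem.Int.toChars (n : Int) = Nat.toDigits 10 n := by
    unfold PySem.Int.toChars
    rw [if_neg (by omega)]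
    simp
  rcases Nat.eq_zero_or_pos n with hn | hn
  · subst hn
    simp only [hchars]
    rfl
  · rw [hchars]
    unfold Nat.toDigits
    rw [toDigitsCore_eq n (n + 1) [] (by omega) hn, List.append_nil, ← List.map_reverse]
    show (match ((Nat.digits 10 n).reverse.map Nat.digitChar).mapM
        (fun c => PySem.Int.ofChars? [c]) with
      | none => none
      | some l1 => some (decide (l1 = l1.reverse))) = some (decide (palN n))
    rw [mapM_digitChar _ (fun d hd => Nat.digits_lt_base (by norm_num)
      (List.mem_reverse.mp hd))]
    show some (decide _) = _
    congr 1
    rw [decide_eq_decide, List.map_reverse, List.reverse_reverse]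
    have hinj : Function.Injective (fun (d : Nat) => (d : Int)) := fun a b hab => by simpa using hab
    constructor
    · intro h
      rw [← List.map_reverse] at h
      exact ((List.map_injective_iff.mpr hinj) h).symm
    · intro h
      rw [← List.map_reverse, ← h]

lemma loopA_eq : ∀ (fuel i p : Nat), i ≤ p → p - i < fuel → palN p →
    (∀ j, i ≤ j → j < p → ¬ palN j) → pvLoopA fuel (i : Int) = some (p : Int) := by
  intro fuel
  induction fuel with
  | zero => intro i p h1 h2; omega
  | succ f ih =>
    intro i p h1 h2 hp hmin
    rw [pvLoopA, isPalA_cast i]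
    by_cases hip : i = p
    · subst hip
      rw [show decide (palN i) = true from decide_eq_true hp]
      rfl
    · have hlt : i < p := by omega
      have hnp : ¬ palN i := hmin i (le_refl _) hlt
      rw [show decide (palN i) = false from decide_eq_false hnp]
      show pvLoopA f ((i : Int) + 1) = some (p : Int)
      have : (i : Int) + 1 = ((i + 1 : Nat) : Int) := by push_cast; ring
      rw [this]
      exact ih (i + 1) p (by omega) (by omega) hp (fun j hj1 hj2 => hmin j (by omega) hj2)


lemma cast_pow10 (e : Nat) : ((10 : Int) ^ e) = (((10 ^ e : Nat) : Int)) := by push_cast; rfl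

lemma digLen_cast (m : Nat) : ∀ d L, (Nat.digits 10 m).length - L = d → L ≤ (Nat.digits 10 m).length →
    pvDigLenB (m : Int) L = (Nat.digits 10 m).length := by
  intro d
  induction d with
  | zero =>
    intro L hd hL
    have hLeq : L = (Nat.digits 10 m).length := by omega
    rw [pvDigLenB, if_neg]
    · exact hLeq
    · rw [cast_pow10, not_le, Int.ofNat_lt]
      subst hLeq
      exact Nat.lt_base_pow_length_digits (by norm_num)
  | succ d ih =>
    intro L hd hL
    have hlt : L < (Nat.digits 10 m).length := by omega
    rw [pvDigLenB, if_pos]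
    · exact ih (L + 1) (by omega) (by omega)
    · rw [cast_pow10, Int.ofNat_le]
      exact (Nat.lt_digits_length_iff (by norm_num) m).mp hlt


lemma revB_cast : ∀ (k : Nat) (y r : Nat), pvRevB k (y : Int) (r : Int) = ((natRev k y r : Nat) : Int) := by
  intro k
  induction k with
  | zero => intro y r; rfl
  | succ k ih =>
    intro y r
    rw [pvRevB, natRev]
    rw [show ((10 : Int)) = ((10 : Nat) : Int) from rfl, PySem.Int.floordiv_natCast,
      PySem.Int.mod_natCast]
    rw [show (r : Int) * ((10 : Nat) : Int) + ((y % 10 : Nat) : Int)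
      = (((r * 10 + y % 10 : Nat) : Nat) : Int) by push_cast; ring]
    exact ih (y / 10) (r * 10 + y % 10)

lemma mirrorB_cast (x L k : Nat) : pvMirrorB (x : Int) L k = ((natMirror x L k : Nat) : Int) := by
  rw [pvMirrorB, natMirror, cast_pow10, cast_pow10 (L % 2), PySem.Int.floordiv_natCast]
  rw [show ((0 : Int)) = (((0 : Nat) : Int)) from rfl, revB_cast]
  push_cast
  ring

lemma alt_cast (number : Int) (h : -1 ≤ number) :
    nearest_palindrome_alt number = ((natAlt (number + 1).toNat : Nat) : Int) := by
  have hm : number + 1 = (((number + 1).toNat : Nat) : Int) := by omega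
  set m := (number + 1).toNat with hmdef
  show (let m' := number + 1
    let L := pvDigLenB m' 0
    let k := L / 2
    let c := pvMirrorB (PySem.Int.floordiv m' (10 ^ k)) L k
    if m' ≤ c then c else pvMirrorB (PySem.Int.floordiv m' (10 ^ k) + 1) L k) = _
  simp only [hm]
  rw [digLen_cast m ((Nat.digits 10 m).length) 0 (by omega) (by omega)]
  rw [cast_pow10, PySem.Int.floordiv_natCast, mirrorB_cast]
  rw [show ((m / 10 ^ ((Nat.digits 10 m).length / 2) : Nat) : Int) + 1
      = (((m / 10 ^ ((Nat.digits 10 m).length / 2) + 1 : Nat) : Nat) : Int) by push_cast; ring]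
  rw [mirrorB_cast, natAlt]
  by_cases hbr : m ≤ natMirror (m / 10 ^ ((Nat.digits 10 m).length / 2)) (Nat.digits 10 m).length
      ((Nat.digits 10 m).length / 2)
  · rw [if_pos hbr, if_pos (by exact_mod_cast hbr)]
  · rw [if_neg hbr, if_neg (by exact_mod_cast hbr)]


lemma ports_agree (number : Int) (h : -1 ≤ number) (hdom : number ≤ 2147483648) :
    nearest_palindrome number = nearest_palindrome_alt number := by
  set m := (number + 1).toNat with hmdef
  have hm : number + 1 = ((m : Nat) : Int) := by omega
  obtain ⟨hle, hpal, hmin, hgap⟩ := natAlt_spec m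
  have hlen : (Nat.digits 10 m).length ≤ 10 := by
    rw [Nat.digits_length_le_iff (by norm_num)]
    omega
  have hk : 10 ^ ((Nat.digits 10 m).length / 2) ≤ 10 ^ 5 := by
    apply Nat.pow_le_pow_right (by norm_num)
    omega
  have hfuel : natAlt m - m < 2000000 := by omega
  rw [nearest_palindrome, hm, loopA_eq 2000000 m (natAlt m) hle hfuel hpal hmin,
    Option.getD_some, alt_cast number h]

-- ===== VERDICT (by name: the statement is the Claim_ definition above) =====
theorem nearest_palindrome_spec : Claim_equal_nearest_palindrome := by
  intro number hdom hpre
  unfold Spec_nearest_palindrome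
  have hdom' : number ≤ 2147483648 := by
    unfold Dom_nearest_palindrome pvDomInt at hdom
    simp only [decide_eq_true_eq] at hdom
    exact hdom.2
  exact ports_agree number hpre hdom'
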